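-- pv_equiv track=rewrite | github.com/jal472/adventofcode_2024 | day1/day1.py | get_list_distance
-- ===== SOURCE A (Python) =====
-- from typing import Tuple, List
--
-- def get_list_distance(a: List[int], b: List[int]) -> int:
--     total_distance = 0
--     # Modified Selection Sort
--     for i in range(len(a)):
--         # if we reach the end of the list, no more comparisons needed to sort the list. Just calculate the distance.
--         if i == len(a)-1:
--             total_distance += abs(a[i] - b[i])
--             break
--         # find the index of the min number of the rightside of the list
--         min_a_idx = min(range(len(a[i+1:])), key=a[i+1:].__getitem__)
--         min_b_idx = min(range(len(b[i+1:])), key=b[i+1:].__getitem__)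
--         # adjust index to account for elements to the left that were omitted in the min search
--         min_a_idx += (i+1)
--         min_b_idx += (i+1)
--         # compare and swap
--         if a[min_a_idx] < a[i]:
--             a[i], a[min_a_idx] = a[min_a_idx], a[i]
--         if b[min_b_idx] < b[i]:
--             b[i], b[min_b_idx] = b[min_b_idx], b[i]
--         # Calculate total distance
--         total_distance += abs(a[i] - b[i])
--     return total_distance
-- ===== SOURCE B (Python) =====
-- def get_list_distance(a, b):
--     return sum(abs(x - y) for x, y in zip(sorted(a), sorted(b)))
-- ===== Notes on version B (the rewrite author's own statement) =====
-- stated objective: faster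
-- what changed: A runs a quadratic in-place partial selection sort, re-slicing and re-scanning the tails of both lists at every index; B just sorts both lists once with sorted() and sums the paired absolute differences over zip.
-- outside the precondition, e.g. on get_list_distance([0], [5, 1]): A returns 5, B returns 1
import Mathlib
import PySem

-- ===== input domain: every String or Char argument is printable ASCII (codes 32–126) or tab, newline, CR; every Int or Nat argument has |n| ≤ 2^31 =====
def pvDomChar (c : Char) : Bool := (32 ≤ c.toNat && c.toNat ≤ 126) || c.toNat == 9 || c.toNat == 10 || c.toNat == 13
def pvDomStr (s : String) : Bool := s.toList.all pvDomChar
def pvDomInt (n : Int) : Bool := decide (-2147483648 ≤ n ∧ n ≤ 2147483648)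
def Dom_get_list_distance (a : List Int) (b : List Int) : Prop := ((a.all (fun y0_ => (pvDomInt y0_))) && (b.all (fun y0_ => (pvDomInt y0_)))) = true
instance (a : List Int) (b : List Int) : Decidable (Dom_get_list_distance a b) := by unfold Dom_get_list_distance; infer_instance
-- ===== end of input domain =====

-- B replaces A's quadratic in-place partial selection sort by sorting both lists once and
-- summing paired absolute differences (asymptotically faster). Python A mutates its argument
-- lists in place; the equivalence proved here is about the return value only (B does not mutate).


-- ===== PORT A =====
-- min(range(len(s)), key=s.__getitem__): Python's min keeps the FIRST index attaining the
-- minimum; PySem.List.min? has exactly that semantics.  On an empty s Python raises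
-- ValueError (min? = none, default never reached under Pre_).
def pvArgmin (s : List Int) : Int :=
  (PySem.List.min? (PySem.List.pyRange 0 (PySem.List.len s) 1)
      (fun j => PySem.List.pyGetD s j 0)).getD 0

-- the body of A's 'for i in range(len(a))' loop; state = (a, b, total_distance, broke)
-- (the 'break' is modelled by the Bool flag).  All indices are in range under
-- Pre_ (equal lengths), so the pyGetD/pySetD defaults are never used there.
def pvBody (n : Int) (st : List Int × List Int × Int × Bool) (i : Int) :
    List Int × List Int × Int × Bool :=
  if st.2.2.2 then st
  else if i = n - 1 then
    (st.1, st.2.1, st.2.2.1 + |PySem.List.pyGetD st.1 i 0 - PySem.List.pyGetD st.2.1 i 0|, true)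
  else
    -- a[i+1:] is PySem.List.slice with lower bound i+1 and no upper bound
    let ma := pvArgmin (PySem.List.slice st.1 (some (i+1)) none) + (i+1)
    let mb := pvArgmin (PySem.List.slice st.2.1 (some (i+1)) none) + (i+1)
    let a' := if PySem.List.pyGetD st.1 ma 0 < PySem.List.pyGetD st.1 i 0 then
        PySem.List.pySetD (PySem.List.pySetD st.1 i (PySem.List.pyGetD st.1 ma 0)) ma
          (PySem.List.pyGetD st.1 i 0)
      else st.1
    let b' := if PySem.List.pyGetD st.2.1 mb 0 < PySem.List.pyGetD st.2.1 i 0 then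
        PySem.List.pySetD (PySem.List.pySetD st.2.1 i (PySem.List.pyGetD st.2.1 mb 0)) mb
          (PySem.List.pyGetD st.2.1 i 0)
      else st.2.1
    (a', b', st.2.2.1 + |PySem.List.pyGetD a' i 0 - PySem.List.pyGetD b' i 0|, false)

def get_list_distance (a : List Int) (b : List Int) : Int :=
  let n : Int := PySem.List.len a
  ((PySem.List.pyRange 0 n 1).foldl (pvBody n) (a, b, 0, false)).2.2.1

-- ===== PORT B =====
def get_list_distance_alt (a : List Int) (b : List Int) : Int :=
  ((PySem.List.sorted a (fun x => x)).zip (PySem.List.sorted b (fun x => x))).foldl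
    (fun t p => t + |p.1 - p.2|) 0

-- ===== PRECONDITION & SPEC =====
-- Pre_ excludes one unspecified corner: b strictly longer than a with some of b's extra tail
-- below some element of its head (when b is SHORTER A raises ValueError/IndexError; equal
-- lengths, empty a, sorted b, and any b whose extra elements dominate its first len(a) ones are
-- all kept and proved equal).  On the excluded inputs A's last paired element of b is whatever
-- its half-finished selection sort over b's extra elements left at that position, while B pairs
-- the zip-truncated sorted prefixes — an unspecified corner with two equally defensible values.
def Pre_get_list_distance (a : List Int) (b : List Int) : Prop :=
  a.length ≤ b.length ∧ ∀ u ∈ b.take a.length, ∀ e ∈ b.drop a.length, u ≤ e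
instance (a : List Int) (b : List Int) : Decidable (Pre_get_list_distance a b) := by
  unfold Pre_get_list_distance; infer_instance

def pvWitness_get_list_distance : List Int × List Int := ([3, 1], [2, 5])

def Spec_get_list_distance (a : List Int) (b : List Int) (out : Int) : Prop := out = get_list_distance_alt a b
instance (a : List Int) (b : List Int) (out : Int) : Decidable (Spec_get_list_distance a b out) := by unfold Spec_get_list_distance; infer_instance

-- ===== CLAIM (what is proved, stated in full; the proofs are below) =====
def Claim_equal_get_list_distance : Prop := ∀ (a : List Int) (b : List Int), Dom_get_list_distance a b → Pre_get_list_distance a b → Spec_get_list_distance a b (get_list_distance a b)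


-- ===== LEMMAS AND PROOFS =====

-- one selection step of A, seen on the suffix a[i:] = head :: tail: look up the first minimum
-- of the tail, swap it with the head if strictly smaller
def selOne (s : List Int) : Int × List Int :=
  match s with
  | [] => (0, [])
  | h :: tl =>
      let k := (pvArgmin tl).toNat
      if tl.getD k 0 < h then (tl.getD k 0, tl.set k h) else (h, tl)

-- what A's loop computes on the suffixes, fuel = suffix length
def pvD : Nat → List Int → List Int → Int
  | 0, _, _ => 0
  | 1, s, t => |s.headD 0 - t.headD 0|
  | n+2, s, t => |(selOne s).1 - (selOne t).1| + pvD (n+1) (selOne s).2 (selOne t).2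

lemma pvArgmin_spec (s : List Int) (hs : s ≠ []) :
    ∃ k : Nat, pvArgmin s = (k : Int) ∧ k < s.length ∧
      ∀ j : Nat, j < s.length → s.getD k 0 ≤ s.getD j 0 := by
  unfold pvArgmin
  rcases ho : PySem.List.min? (PySem.List.pyRange 0 (PySem.List.len s) 1)
      (fun j => PySem.List.pyGetD s j 0) with _ | j0
  · exfalso
    rw [PySem.List.min?_eq_none_iff] at ho
    have : ((0:Int) : Int) ∈ PySem.List.pyRange 0 (PySem.List.len s) 1 := by
      rw [PySem.List.mem_pyRange_one]
      simp [PySem.List.len_eq]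
      exact List.length_pos_iff.mpr hs
    rw [ho] at this; simp at this
  · have hmem := PySem.List.min?_mem ho
    rw [PySem.List.mem_pyRange_one] at hmem
    simp [PySem.List.len_eq] at hmem
    obtain ⟨h0, hlt⟩ := hmem
    refine ⟨j0.toNat, by simp [Int.toNat_of_nonneg h0], by omega, ?_⟩
    intro j hj
    have := PySem.List.min?_isMin ho (j : Int) (by
      rw [PySem.List.mem_pyRange_one]; simp [PySem.List.len_eq]; omega)
    simp only [PySem.List.pyGetD_natCast] at this ⊢
    rw [PySem.List.pyGetD_of_nonneg] at this
    · convert this using 2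
    · exact h0


lemma selOne_length (s : List Int) (hs : s ≠ []) : (selOne s).2.length + 1 = s.length := by
  match s with
  | h :: tl =>
    simp only [selOne]
    split <;> simp

lemma perm_swap_head (h m : Int) (u v : List Int) :
    (h :: (u ++ m :: v)).Perm (m :: (u ++ h :: v)) := by
  have p1 : (h :: (u ++ m :: v)).Perm (h :: m :: (u ++ v)) := (List.perm_middle).cons h
  have p2 : (h :: m :: (u ++ v)).Perm (m :: h :: (u ++ v)) := List.Perm.swap _ _ _
  have p3 : (m :: h :: (u ++ v)).Perm (m :: (u ++ h :: v)) := (List.perm_middle.symm).cons m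
  exact (p1.trans p2).trans p3

lemma selOne_perm (s : List Int) (h2 : 2 ≤ s.length) : s.Perm ((selOne s).1 :: (selOne s).2) := by
  match s with
  | h :: tl =>
    have htl : tl ≠ [] := by intro e; rw [e] at h2; simp at h2
    obtain ⟨k, hk, hklt, hmin⟩ := pvArgmin_spec tl htl
    simp only [selOne, hk, Int.toNat_natCast]
    split
    · have hgd : tl.getD k 0 = tl[k] := List.getD_eq_getElem tl 0 hklt
      have hd' : tl = tl.take k ++ tl.getD k 0 :: tl.drop (k+1) := by
        rw [hgd]
        conv_lhs => rw [← List.take_append_drop k tl]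
        rw [List.drop_eq_getElem_cons hklt]
      have hset : tl.set k h = tl.take k ++ h :: tl.drop (k+1) :=
        List.set_eq_take_cons_drop h hklt
      have := perm_swap_head h (tl.getD k 0) (tl.take k) (tl.drop (k+1))
      rw [← hset] at this
      conv at this => lhs; rw [← hd']
      exact this
    · exact List.Perm.refl _

lemma selOne_isMin (s : List Int) (h2 : 2 ≤ s.length) : ∀ z ∈ s, (selOne s).1 ≤ z := by
  match s with
  | h :: tl =>
    have htl : tl ≠ [] := by intro e; rw [e] at h2; simp at h2
    obtain ⟨k, hk, hklt, hmin⟩ := pvArgmin_spec tl htl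
    intro z hz
    have hzc : z = h ∨ z ∈ tl := by simpa using hz
    have htlmin : ∀ w ∈ tl, tl.getD k 0 ≤ w := by
      intro w hw
      obtain ⟨j, hj, rfl⟩ := List.getElem_of_mem hw
      have := hmin j hj
      rwa [List.getD_eq_getElem tl 0 hj] at this
    simp only [selOne, hk, Int.toNat_natCast]
    split
    · rename_i hlt
      rcases hzc with rfl | hz'
      · exact le_of_lt hlt
      · exact htlmin z hz'
    · rename_i hge
      push Not at hge
      rcases hzc with rfl | hz'
      · exact le_refl z
      · exact le_trans hge (htlmin z hz')


lemma min_cons_sorted (m : Int) (l : List Int) (hm : ∀ z ∈ l, m ≤ z) :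
    PySem.List.sorted (m :: l) (fun x => x) = m :: PySem.List.sorted l (fun x => x) := by
  apply PySem.List.sorted_id_eq_of_perm_of_pairwise
  · exact (PySem.List.sorted_perm l (fun x => x) false).cons m
  · rw [List.pairwise_cons]
    refine ⟨fun z hz => hm z ((PySem.List.mem_sorted _ _ _ _).mp hz), ?_⟩
    exact PySem.List.sorted_pairwise l (fun x => x)

lemma pvD_eq_sorted_sum : ∀ (n : Nat) (x y : List Int), x.length = n → y.length = n →
    pvD n x y =
      (((PySem.List.sorted x (fun x => x)).zip (PySem.List.sorted y (fun x => x))).map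
        (fun p => |p.1 - p.2|)).sum := by
  intro n
  induction n using Nat.strong_induction_on with
  | _ n ih =>
    match n with
    | 0 =>
      intro x y hx hy
      rw [List.length_eq_zero_iff] at hx hy
      subst hx; subst hy
      have : PySem.List.sorted ([]:List Int) (fun x => x) = [] :=
        PySem.List.sorted_eq_self_of_pairwise _ _ (by simp)
      simp [pvD, this]
    | 1 =>
      intro x y hx hy
      rw [List.length_eq_one_iff] at hx hy
      obtain ⟨x0, rfl⟩ := hx; obtain ⟨y0, rfl⟩ := hy
      have hsx : PySem.List.sorted [x0] (fun x => x) = [x0] :=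
        PySem.List.sorted_eq_self_of_pairwise _ _ (by simp)
      have hsy : PySem.List.sorted [y0] (fun x => x) = [y0] :=
        PySem.List.sorted_eq_self_of_pairwise _ _ (by simp)
      simp [pvD, hsx, hsy]
    | (d+2) =>
      intro x y hx hy
      have h2x : 2 ≤ x.length := by omega
      have h2y : 2 ≤ y.length := by omega
      have hpx := selOne_perm x h2x
      have hpy := selOne_perm y h2y
      have hlx : (selOne x).2.length = d + 1 := by
        have := selOne_length x (by intro e; rw [e] at h2x; simp at h2x); omega
      have hly : (selOne y).2.length = d + 1 := by
        have := selOne_length y (by intro e; rw [e] at h2y; simp at h2y); omega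
      have hsx : PySem.List.sorted x (fun x => x) =
          (selOne x).1 :: PySem.List.sorted (selOne x).2 (fun x => x) := by
        rw [PySem.List.sorted_eq_sorted_of_perm x ((selOne x).1 :: (selOne x).2) _
          (fun a b h => h) hpx]
        exact min_cons_sorted _ _ (fun z hz =>
          selOne_isMin x h2x z (hpx.symm.mem_iff.mp (List.mem_cons_of_mem _ hz)))
      have hsy : PySem.List.sorted y (fun x => x) =
          (selOne y).1 :: PySem.List.sorted (selOne y).2 (fun x => x) := by
        rw [PySem.List.sorted_eq_sorted_of_perm y ((selOne y).1 :: (selOne y).2) _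
          (fun a b h => h) hpy]
        exact min_cons_sorted _ _ (fun z hz =>
          selOne_isMin y h2y z (hpy.symm.mem_iff.mp (List.mem_cons_of_mem _ hz)))
      rw [show pvD (d+2) x y = |(selOne x).1 - (selOne y).1| + pvD (d+1) (selOne x).2 (selOne y).2 from rfl]
      rw [ih (d+1) (by omega) _ _ hlx hly, hsx, hsy]
      simp [List.zip_cons_cons]

-- the fold step of PySem.List.min? (named so the proofs below can rewrite with it)
def pvMinF (key : Int → Int) (acc : Option Int) (x : Int) : Option Int :=
  match acc with
  | none => some x
  | some m => if key x < key m then some x else some m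

lemma min?_eq_foldF (xs : List Int) (key : Int → Int) :
    PySem.List.min? xs key = xs.foldl (pvMinF key) none := by
  simp only [PySem.List.min?]
  apply PySem.List.foldl_congr_mem
  intro acc x _
  cases acc <;> rfl

lemma min_foldl_keep (key : Int → Int) (l : List Int) (m : Int)
    (h : ∀ x ∈ l, ¬ key x < key m) :
    l.foldl (pvMinF key) (some m) = some m := by
  induction l with
  | nil => rfl
  | cons a t ih =>
    simp only [List.foldl_cons, pvMinF]
    rw [if_neg (h a (List.mem_cons_self))]
    exact ih (fun x hx => h x (List.mem_cons_of_mem _ hx))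

lemma foldl_min_congr (keyf keyg : Int → Int) (P : Int → Prop) :
    ∀ (l : List Int), (∀ j ∈ l, P j) → (∀ j, P j → keyf j = keyg j) →
    ∀ (acc : Option Int), (∀ mm, acc = some mm → P mm) →
    l.foldl (pvMinF keyf) acc = l.foldl (pvMinF keyg) acc := by
  intro l
  induction l with
  | nil => intro _ _ _ _; rfl
  | cons a t ih =>
    intro hl hkey acc hacc
    simp only [List.foldl_cons]
    have ha : P a := hl a (List.mem_cons_self)
    match acc with
    | none =>
      exact ih (fun j hj => hl j (List.mem_cons_of_mem _ hj)) hkey (some a)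
        (fun mm hmm => by cases hmm; exact ha)
    | some mm =>
      have hP : P mm := hacc mm rfl
      simp only [pvMinF]
      rw [hkey a ha, hkey mm hP]
      split
      · exact ih (fun j hj => hl j (List.mem_cons_of_mem _ hj)) hkey (some a)
          (fun m2 hm2 => by cases hm2; exact ha)
      · exact ih (fun j hj => hl j (List.mem_cons_of_mem _ hj)) hkey (some mm)
          (fun m2 hm2 => by cases hm2; exact hP)

lemma pvArgmin_append (tq ex : List Int) (htq : tq ≠ [])
    (hle : ∀ u ∈ tq, ∀ e ∈ ex, u ≤ e) :
    pvArgmin (tq ++ ex) = pvArgmin tq := by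
  unfold pvArgmin
  rw [min?_eq_foldF, min?_eq_foldF]
  simp only [PySem.List.len_eq, List.length_append]
  rw [show ((tq.length + ex.length : Nat) : Int) = (tq.length : Int) + (ex.length : Int) by push_cast; ring]
  rw [PySem.List.pyRange_one_append 0 (tq.length : Int) ((tq.length : Int) + (ex.length : Int))
    (by omega) (by omega), List.foldl_append]
  have hkeys : ∀ j : Int, (0 ≤ j ∧ j < (tq.length : Int)) →
      PySem.List.pyGetD (tq ++ ex) j 0 = PySem.List.pyGetD tq j 0 := by
    intro j hj
    rw [PySem.List.pyGetD_eq_getElem _ _ hj.1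
          (by simp only [List.length_append]; push_cast; omega),
        PySem.List.pyGetD_eq_getElem _ _ hj.1 (by omega)]
    exact List.getElem_append_left (by omega)
  rw [foldl_min_congr (fun j => PySem.List.pyGetD (tq ++ ex) j 0)
      (fun j => PySem.List.pyGetD tq j 0) (fun j => 0 ≤ j ∧ j < (tq.length : Int))
      (PySem.List.pyRange 0 (tq.length : Int) 1)
      (fun j hj => (PySem.List.mem_pyRange_one).mp hj)
      hkeys none (fun mm h => by cases h)]
  obtain ⟨j0, hj0⟩ : ∃ j0, PySem.List.min? (PySem.List.pyRange 0 ((tq.length : Nat) : Int) 1)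
      (fun j => PySem.List.pyGetD tq j 0) = some j0 := by
    cases h : PySem.List.min? (PySem.List.pyRange 0 ((tq.length : Nat) : Int) 1)
      (fun j => PySem.List.pyGetD tq j 0) with
    | none =>
      rw [PySem.List.min?_eq_none_iff] at h
      exfalso
      have h0 : ((0:Int)) ∈ PySem.List.pyRange 0 ((tq.length : Nat) : Int) 1 := by
        rw [PySem.List.mem_pyRange_one]
        have : tq.length ≠ 0 := fun hh => htq (List.eq_nil_of_length_eq_zero hh)
        omega
      rw [h] at h0; simp at h0
    | some v => exact ⟨v, rfl⟩
  have hj0mem := PySem.List.min?_mem hj0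
  rw [PySem.List.mem_pyRange_one] at hj0mem
  rw [min?_eq_foldF] at hj0
  rw [hj0]
  have hbound : ∀ x ∈ PySem.List.pyRange ((tq.length : Nat) : Int) ((tq.length : Int) + (ex.length : Int)) 1,
      ¬ PySem.List.pyGetD (tq ++ ex) x 0 < PySem.List.pyGetD (tq ++ ex) j0 0 := by
    intro x hx
    rw [PySem.List.mem_pyRange_one] at hx
    have hgx : PySem.List.pyGetD (tq ++ ex) x 0 = ex[x.toNat - tq.length]'(by omega) := by
      rw [PySem.List.pyGetD_eq_getElem _ _ (by omega)
        (by simp only [List.length_append]; push_cast; omega)]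
      exact List.getElem_append_right (by omega)
    have hgj : PySem.List.pyGetD (tq ++ ex) j0 0 = tq[j0.toNat]'(by omega) := by
      rw [hkeys j0 ⟨hj0mem.1, hj0mem.2⟩]
      exact PySem.List.pyGetD_eq_getElem _ _ hj0mem.1 (by omega)
    rw [hgx, hgj]
    exact not_lt.mpr (hle _ (List.getElem_mem _) _ (List.getElem_mem _))
  rw [min_foldl_keep (fun j => PySem.List.pyGetD (tq ++ ex) j 0) _ j0 hbound]

lemma selOne_append (s ex : List Int) (h2 : 2 ≤ s.length)
    (hle : ∀ u ∈ s, ∀ e ∈ ex, u ≤ e) :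
    selOne (s ++ ex) = ((selOne s).1, (selOne s).2 ++ ex) := by
  match s with
  | h :: tl =>
    have htl : tl ≠ [] := by intro e; rw [e] at h2; simp at h2
    obtain ⟨k, hk, hklt, _⟩ := pvArgmin_spec tl htl
    have hargs : pvArgmin (tl ++ ex) = pvArgmin tl :=
      pvArgmin_append tl ex htl
        (fun u hu e he => hle u (List.mem_cons_of_mem _ hu) e he)
    rw [show (h :: tl) ++ ex = h :: (tl ++ ex) from rfl]
    simp only [selOne, hargs, hk, Int.toNat_natCast]
    have hgd : (tl ++ ex).getD k 0 = tl.getD k 0 := by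
      rw [List.getD_eq_getElem _ 0 (by simp only [List.length_append]; omega),
          List.getD_eq_getElem _ 0 hklt]
      exact List.getElem_append_left hklt
    rw [hgd]
    split
    · rw [List.set_append_left _ _ hklt]
    · rfl

lemma pvD_append : ∀ (d : Nat) (x q ex : List Int), x.length = d → q.length = d →
    (∀ u ∈ q, ∀ e ∈ ex, u ≤ e) → pvD d x (q ++ ex) = pvD d x q := by
  intro d
  induction d with
  | zero => intro x q ex _ _ _; rfl
  | succ e ih =>
    match e with
    | 0 =>
      intro x q ex hx hq _
      rw [List.length_eq_one_iff] at hq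
      obtain ⟨q0, rfl⟩ := hq
      simp [pvD]
    | e' + 1 =>
      intro x q ex hx hq hle
      have h2q : 2 ≤ q.length := by omega
      have hsel := selOne_append q ex h2q hle
      rw [show pvD (e'+2) x (q ++ ex) =
        |(selOne x).1 - (selOne (q ++ ex)).1| +
          pvD (e'+1) (selOne x).2 (selOne (q ++ ex)).2 from rfl]
      rw [show pvD (e'+2) x q =
        |(selOne x).1 - (selOne q).1| +
          pvD (e'+1) (selOne x).2 (selOne q).2 from rfl]
      rw [hsel]
      have hlen : (selOne q).2.length = e' + 1 := by
        have := selOne_length q (by intro hq0; rw [hq0] at h2q; simp at h2q); omega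
      have hperm := selOne_perm q h2q
      have hsub : ∀ u ∈ (selOne q).2, ∀ e ∈ ex, u ≤ e := by
        intro u hu e he
        exact hle u (hperm.symm.mem_iff.mp (List.mem_cons_of_mem _ hu)) e he
      have hxlen : (selOne x).2.length = e' + 1 := by
        have := selOne_length x (by intro hx0; rw [hx0] at hx; simp at hx); omega
      rw [ih (selOne x).2 (selOne q).2 ex hxlen hlen hsub]

lemma zip_left_append : ∀ (x q : List Int) (ex : List Int), x.length = q.length →
    x.zip (q ++ ex) = x.zip q := by
  intro x
  induction x with
  | nil => intro q ex _; rfl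
  | cons a t ih =>
    intro q ex h
    match q with
    | q0 :: qt =>
      simp only [List.cons_append, List.zip_cons_cons, List.cons.injEq, true_and]
      exact ih qt ex (by simpa using h)

lemma sorted_append_of_le (q ex : List Int) (hle : ∀ u ∈ q, ∀ e ∈ ex, u ≤ e) :
    PySem.List.sorted (q ++ ex) (fun x => x) =
      PySem.List.sorted q (fun x => x) ++ PySem.List.sorted ex (fun x => x) := by
  apply PySem.List.sorted_id_eq_of_perm_of_pairwise
  · exact (PySem.List.sorted_perm q _ _).append (PySem.List.sorted_perm ex _ _)
  · rw [List.pairwise_append]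
    exact ⟨PySem.List.sorted_pairwise q _, PySem.List.sorted_pairwise ex _,
      fun u hu e he => hle u ((PySem.List.mem_sorted _ _ _ _).mp hu) e
        ((PySem.List.mem_sorted _ _ _ _).mp he)⟩

lemma step_spec_aux (x : List Int) (i : Nat) (h : i + 2 ≤ x.length) :
    (if PySem.List.pyGetD x (pvArgmin (PySem.List.slice x (some ((i:Int)+1)) none) + ((i:Int)+1)) 0 <
          PySem.List.pyGetD x (i:Int) 0 then
        PySem.List.pySetD
          (PySem.List.pySetD x (i:Int)
            (PySem.List.pyGetD x (pvArgmin (PySem.List.slice x (some ((i:Int)+1)) none) + ((i:Int)+1)) 0))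
          (pvArgmin (PySem.List.slice x (some ((i:Int)+1)) none) + ((i:Int)+1))
          (PySem.List.pyGetD x (i:Int) 0)
      else x).length = x.length ∧
    (if PySem.List.pyGetD x (pvArgmin (PySem.List.slice x (some ((i:Int)+1)) none) + ((i:Int)+1)) 0 <
          PySem.List.pyGetD x (i:Int) 0 then
        PySem.List.pySetD
          (PySem.List.pySetD x (i:Int)
            (PySem.List.pyGetD x (pvArgmin (PySem.List.slice x (some ((i:Int)+1)) none) + ((i:Int)+1)) 0))
          (pvArgmin (PySem.List.slice x (some ((i:Int)+1)) none) + ((i:Int)+1))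
          (PySem.List.pyGetD x (i:Int) 0)
      else x).drop i = (selOne (x.drop i)).1 :: (selOne (x.drop i)).2 := by
  have hi : i < x.length := by omega
  have hslice : PySem.List.slice x (some ((i:Int)+1)) none = x.drop (i+1) := by
    rw [PySem.List.slice_from x (by omega : (0:Int) ≤ (i:Int)+1)]
    norm_num
  set tl := x.drop (i+1) with htl_def
  have htl : tl ≠ [] := by
    have : tl.length = x.length - (i+1) := by simp [htl_def]
    intro e; rw [e] at this; simp at this; omega
  obtain ⟨k, hk, hklt, _⟩ := pvArgmin_spec tl htl
  have hkx : i + 1 + k < x.length := by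
    have : tl.length = x.length - (i+1) := by simp [htl_def]
    omega
  have hma : pvArgmin (PySem.List.slice x (some ((i:Int)+1)) none) + ((i:Int)+1) =
      ((i + 1 + k : Nat) : Int) := by
    rw [hslice, hk]; push_cast; ring
  have htlk : tl[k] = x[i+1+k] := by
    simp [htl_def, List.getElem_drop]
  have hgd_ma : PySem.List.pyGetD x (pvArgmin (PySem.List.slice x (some ((i:Int)+1)) none) + ((i:Int)+1)) 0 =
      tl.getD k 0 := by
    rw [hma, PySem.List.pyGetD_natCast, List.getD_eq_getElem x 0 hkx,
        List.getD_eq_getElem tl 0 hklt, htlk]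
  have hgd_i : PySem.List.pyGetD x (i:Int) 0 = x[i] := by
    rw [PySem.List.pyGetD_natCast, List.getD_eq_getElem x 0 hi]
  have hdropi : x.drop i = x[i] :: tl := by
    rw [htl_def]; exact List.drop_eq_getElem_cons hi
  have hsel : selOne (x.drop i) =
      (if tl.getD k 0 < x[i] then (tl.getD k 0, tl.set k x[i]) else (x[i], tl)) := by
    rw [hdropi]
    simp only [selOne, hk, Int.toNat_natCast]
  rw [hgd_ma, hgd_i, hma, hsel]
  by_cases hc : tl.getD k 0 < x[i]
  · rw [if_pos hc, if_pos hc]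
    rw [PySem.List.pySetD_natCast, PySem.List.pySetD_natCast]
    constructor
    · simp
    · rw [List.drop_set, List.drop_set]
      rw [if_neg (by omega), if_neg (by omega)]
      rw [hdropi]
      have e1 : (i - i) = 0 := by omega
      have e2 : (i + 1 + k - i) = k + 1 := by omega
      rw [e1, e2]
      simp
  · rw [if_neg hc, if_neg hc, hdropi]
    exact ⟨rfl, rfl⟩

lemma head_tail_of_drop (x' : List Int) (i : Nat) (c : Int) (r : List Int)
    (hi : i < x'.length) (hdrop : x'.drop i = c :: r) :
    PySem.List.pyGetD x' (i:Int) 0 = c ∧ x'.drop (i+1) = r := by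
  constructor
  · rw [PySem.List.pyGetD_natCast, List.getD_eq_getElem _ 0 hi]
    have h2 := List.getElem_drop (xs := x') (i := i) (j := 0) (h := by simp [hdrop])
    simp [hdrop] at h2
    exact h2.symm
  · have := congrArg List.tail hdrop
    rwa [List.tail_drop, List.tail_cons] at this

lemma step_spec (x : List Int) (i : Nat) (h : i + 2 ≤ x.length) :
    ∃ x', (if PySem.List.pyGetD x (pvArgmin (PySem.List.slice x (some ((i:Int)+1)) none) + ((i:Int)+1)) 0 <
          PySem.List.pyGetD x (i:Int) 0 then
        PySem.List.pySetD
          (PySem.List.pySetD x (i:Int)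
            (PySem.List.pyGetD x (pvArgmin (PySem.List.slice x (some ((i:Int)+1)) none) + ((i:Int)+1)) 0))
          (pvArgmin (PySem.List.slice x (some ((i:Int)+1)) none) + ((i:Int)+1))
          (PySem.List.pyGetD x (i:Int) 0)
      else x) = x' ∧
      x'.length = x.length ∧
      x'.drop i = (selOne (x.drop i)).1 :: (selOne (x.drop i)).2 ∧
      PySem.List.pyGetD x' (i:Int) 0 = (selOne (x.drop i)).1 ∧
      x'.drop (i+1) = (selOne (x.drop i)).2 := by
  obtain ⟨hlen, hdrop⟩ := step_spec_aux x i h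
  have hi : i < x.length := by omega
  rw [← hlen] at hi
  obtain ⟨h1, h2⟩ := head_tail_of_drop _ i _ _ hi hdrop
  exact ⟨_, rfl, hlen, hdrop, h1, h2⟩

lemma loop_eq (n : Nat) : ∀ (d i : Nat) (x y : List Int) (t : Int), i + d = n →
    x.length = n → n ≤ y.length →
    ((PySem.List.pyRange (i : Int) (n : Int) 1).foldl (pvBody (n : Int)) (x, y, t, false)).2.2.1 =
      t + pvD d (x.drop i) (y.drop i) := by
  intro d
  induction d with
  | zero =>
    intro i x y t hin hx hy
    rw [PySem.List.pyRange_one_eq_nil (by exact_mod_cast (by omega : n ≤ i))]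
    simp [pvD]
  | succ d' ih =>
    intro i x y t hin hx hy
    have hilt : (i : Int) < (n : Int) := by exact_mod_cast (by omega : i < n)
    rw [PySem.List.pyRange_one_cons hilt]
    rw [List.foldl_cons]
    match d' with
    | 0 =>
      -- last index: i = n - 1, the break branch
      have hieq : (i : Int) = (n : Int) - 1 := by omega
      have hbody : pvBody (n:Int) (x, y, t, false) (i:Int) =
          (x, y, t + |PySem.List.pyGetD x (i:Int) 0 - PySem.List.pyGetD y (i:Int) 0|, true) := by
        simp only [pvBody]
        simp [hieq]
      rw [hbody]
      have : ((i : Int) + 1) = (n : Int) := by omega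
      rw [this, PySem.List.pyRange_one_eq_nil (le_refl _), List.foldl_nil]
      have hdx : x.drop i = x[i]'(by omega) :: x.drop (i+1) :=
        List.drop_eq_getElem_cons (by omega)
      have hdy : y.drop i = y[i]'(by omega) :: y.drop (i+1) :=
        List.drop_eq_getElem_cons (by omega)
      simp only [pvD, hdx, hdy, List.headD_cons]
      rw [PySem.List.pyGetD_natCast, PySem.List.pyGetD_natCast,
          List.getD_eq_getElem x 0 (by omega), List.getD_eq_getElem y 0 (by omega)]
    | e + 1 =>
      have hine : (i : Int) ≠ (n : Int) - 1 := by omega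
      obtain ⟨x', hx'e, hx'len, hx'drop, hx'get, hx'tail⟩ := step_spec x i (by omega)
      obtain ⟨y', hy'e, hy'len, hy'drop, hy'get, hy'tail⟩ := step_spec y i (by omega)
      have hbody : pvBody (n:Int) (x, y, t, false) (i:Int) =
          (x', y', t + |PySem.List.pyGetD x' (i:Int) 0 - PySem.List.pyGetD y' (i:Int) 0|, false) := by
        simp only [pvBody]
        rw [if_neg (by simp), if_neg hine, ← hx'e, ← hy'e]
      rw [hbody]
      have hcast : ((i : Int) + 1) = ((i + 1 : Nat) : Int) := by push_cast; ring
      rw [hcast]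
      rw [ih (i+1) x' y' _ (by omega) (by omega) (by omega)]
      rw [hx'tail, hy'tail, hx'get, hy'get]
      rw [show pvD (e+2) (x.drop i) (y.drop i) =
        |(selOne (x.drop i)).1 - (selOne (y.drop i)).1| +
          pvD (e+1) (selOne (x.drop i)).2 (selOne (y.drop i)).2 from rfl]
      ring

-- ===== VERDICT (by name: the statement is the Claim_ definition above) =====
theorem get_list_distance_spec : Claim_equal_get_list_distance := by
  intro a b _ hpre
  unfold Pre_get_list_distance at hpre
  obtain ⟨hlen, hle⟩ := hpre
  unfold Spec_get_list_distance get_list_distance get_list_distance_alt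
  simp only [PySem.List.len_eq]
  have hb : b.take a.length ++ b.drop a.length = b := List.take_append_drop _ b
  have hqlen : (b.take a.length).length = a.length := by
    simp only [List.length_take]; omega
  -- A's loop = pvD on (a, b); the extra tail of b never enters a swap, so it can be cut off
  have hloop := loop_eq a.length a.length 0 a b 0 (by omega) rfl hlen
  simp only [Nat.cast_zero, List.drop_zero, zero_add] at hloop
  rw [hloop]
  rw [show pvD a.length a b = pvD a.length a (b.take a.length ++ b.drop a.length) from by rw [hb]]
  rw [pvD_append a.length a (b.take a.length) (b.drop a.length) rfl hqlen hle]
  rw [pvD_eq_sorted_sum a.length a (b.take a.length) rfl hqlen]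
  -- B: sorting b sorts the two blocks independently, and zip truncates at len(a)
  rw [show PySem.List.sorted b (fun x => x) =
      PySem.List.sorted (b.take a.length ++ b.drop a.length) (fun x => x) from by rw [hb]]
  rw [sorted_append_of_le _ _ hle]
  rw [zip_left_append _ _ _ (by rw [PySem.List.length_sorted, PySem.List.length_sorted, hqlen])]
  rw [PySem.List.foldl_add]
  simp
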